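-- pv_equiv track=rewrite | github.com/oupirum/sp2cp | parse_dataset.py | split_to_comment_sequences
-- ===== SOURCE A (Python) =====
-- from collections import Counter
--
-- def split_to_comment_sequences(threads, seq_max_len, seq_min_len):
-- 	lexicon = Counter()
--
-- 	sequences = []
-- 	comment = []
-- 	for thread in threads:
-- 		for token in thread:
-- 			comment.append(token)
-- 			if token == '<eoc>':
-- 				if comment \
-- 						and len(comment) <= seq_max_len \
-- 						and len(comment) >= seq_min_len:
-- 					sequences.append(comment)
-- 					lexicon.update(comment)
-- 				comment = []
--
-- 	return (sequences, lexicon)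
-- ===== SOURCE B (Python) =====
-- from collections import Counter
--
--
-- def split_to_comment_sequences(threads, seq_max_len, seq_min_len):
--     # Index-and-slice: concatenate the threads into one stream, then repeatedly
--     # locate the next '<eoc>' with list.index and slice the comment out whole;
--     # no per-token accumulator is maintained.  Tokens after the last '<eoc>'
--     # are never reached by index(), so they are dropped exactly as in A.
--     stream = []
--     for thread in threads:
--         stream += thread
--     sequences = []
--     start = 0
--     while True:
--         try:
--             end = stream.index('<eoc>', start) + 1
--         except ValueError:
--             break
--         if seq_min_len <= end - start <= seq_max_len:
--             sequences.append(stream[start:end])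
--         start = end
--     lexicon = Counter(tok for seq in sequences for tok in seq)
--     return (sequences, lexicon)
-- ===== Notes on version B (the rewrite author's own statement) =====
-- stated objective: alternative
-- what changed: Replaces A's per-token accumulator loop (append each token to a growing comment, flush on the sentinel, update the Counter inline) with an index-and-slice algorithm: concatenate the threads, repeatedly locate the next '<eoc>' with list.index and slice the whole comment out, then count tokens of the accepted slices in one final pass.
import Mathlib
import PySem

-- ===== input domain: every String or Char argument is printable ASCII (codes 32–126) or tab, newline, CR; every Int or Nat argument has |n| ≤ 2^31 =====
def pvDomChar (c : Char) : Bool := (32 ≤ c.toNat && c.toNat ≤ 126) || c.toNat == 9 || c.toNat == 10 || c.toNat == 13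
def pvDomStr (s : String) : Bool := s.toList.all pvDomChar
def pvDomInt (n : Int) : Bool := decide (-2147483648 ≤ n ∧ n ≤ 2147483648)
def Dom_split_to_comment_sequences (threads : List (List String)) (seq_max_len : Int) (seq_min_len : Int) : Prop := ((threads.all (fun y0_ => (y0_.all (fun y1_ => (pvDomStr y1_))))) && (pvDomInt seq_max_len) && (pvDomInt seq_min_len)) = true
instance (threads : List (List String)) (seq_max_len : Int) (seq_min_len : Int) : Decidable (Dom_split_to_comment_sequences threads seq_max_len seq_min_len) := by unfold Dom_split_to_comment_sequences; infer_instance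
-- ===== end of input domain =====

-- B replaces A's per-token accumulator loop with an index-and-slice algorithm (locate each '<eoc>' with list.index, slice the comment out whole, count afterwards); objective: alternative, same cost.
-- ===== PORT A =====
-- lexicon.update(comment): Counter.update increments each element's count in list order
def pvCounterUpdate (lex : PySem.Dict String Int) (comment : List String) : PySem.Dict String Int :=
  comment.foldl (fun d t => d.modify t 0 (· + 1)) lex

-- the body of A's inner 'for token in thread' loop
def pvStepA (seq_max_len seq_min_len : Int)
    (st : List (List String) × PySem.Dict String Int × List String) (token : String) :
    List (List String) × PySem.Dict String Int × List String :=
  let comment := st.2.2 ++ [token]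
  if token = "<eoc>" then
    if comment ≠ [] ∧ (comment.length : Int) ≤ seq_max_len ∧ (comment.length : Int) ≥ seq_min_len then
      (st.1 ++ [comment], pvCounterUpdate st.2.1 comment, [])
    else (st.1, st.2.1, [])
  else (st.1, st.2.1, comment)

def split_to_comment_sequences (threads : List (List String)) (seq_max_len : Int) (seq_min_len : Int) : List (List String) × (List (String × Int)) :=
  let st := threads.foldl (fun st thread => thread.foldl (pvStepA seq_max_len seq_min_len) st)
    ([], PySem.Dict.empty, [])
  (st.1, st.2.1.items)

-- ===== PORT B =====
-- B's while loop: stream.index('<eoc>', start) searches the suffix from 'start';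
-- ported as recursion on the remaining suffix (exact: index with a start offset
-- equals index on the dropped suffix, and stream[start:end] is that suffix's take).
def pvSliceSeqs (stream : List String) (mx mn : Int) : List (List String) :=
  match h : PySem.List.index? stream "<eoc>" with
  | none => []
  | some i =>
      if mn ≤ (i : Int) + 1 ∧ (i : Int) + 1 ≤ mx then
        stream.take (i + 1) :: pvSliceSeqs (stream.drop (i + 1)) mx mn
      else pvSliceSeqs (stream.drop (i + 1)) mx mn
termination_by stream.length
decreasing_by
  all_goals
    { have hk := PySem.List.getElem_of_index?_eq_some h
      obtain ⟨hk, -, -⟩ := hk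
      simp [List.length_drop]; omega }

def split_to_comment_sequences_alt (threads : List (List String)) (seq_max_len : Int) (seq_min_len : Int) : List (List String) × (List (String × Int)) :=
  let stream := threads.foldl (fun s thread => s ++ thread) []
  let sequences := pvSliceSeqs stream seq_max_len seq_min_len
  let lexicon := PySem.Dict.counter sequences.flatten
  (sequences, lexicon.items)

-- ===== PRECONDITION & SPEC =====
def Spec_split_to_comment_sequences (threads : List (List String)) (seq_max_len : Int) (seq_min_len : Int) (out : List (List String) × (List (String × Int))) : Prop := out = split_to_comment_sequences_alt threads seq_max_len seq_min_len
instance (threads : List (List String)) (seq_max_len : Int) (seq_min_len : Int) (out : List (List String) × (List (String × Int))) : Decidable (Spec_split_to_comment_sequences threads seq_max_len seq_min_len out) := by unfold Spec_split_to_comment_sequences; infer_instance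

-- ===== CLAIM (what is proved, stated in full; the proofs are below) =====
def Claim_equal_split_to_comment_sequences : Prop := ∀ (threads : List (List String)) (seq_max_len : Int) (seq_min_len : Int), Dom_split_to_comment_sequences threads seq_max_len seq_min_len → Spec_split_to_comment_sequences threads seq_max_len seq_min_len (split_to_comment_sequences threads seq_max_len seq_min_len)

-- ===== LEMMAS AND PROOFS =====

-- length-bound predicate shared by the two conditions
def pvP (seq_max_len seq_min_len : Int) (g : List String) : Bool :=
  decide (seq_min_len ≤ (g.length : Int) ∧ (g.length : Int) ≤ seq_max_len)

-- proof-internal grouping step (bridge between A's interleaved fold and B's slicing)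
def pvGroupStep (st : List (List String) × List String) (token : String) :
    List (List String) × List String :=
  let current := st.2 ++ [token]
  if token = "<eoc>" then (st.1 ++ [current], []) else (st.1, current)

-- the grouping loop: a pre-seeded group accumulator just prefixes the result
theorem groupStep_acc (ts : List String) (gs : List (List String)) (cur : List String) :
    ts.foldl pvGroupStep (gs, cur) =
      (gs ++ (ts.foldl pvGroupStep ([], cur)).1, (ts.foldl pvGroupStep ([], cur)).2) := by
  induction ts generalizing gs cur with
  | nil => simp
  | cons t ts ih =>
    simp only [List.foldl_cons, pvGroupStep]
    by_cases h : t = "<eoc>"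
    · subst h
      simp only [reduceIte, List.nil_append]
      rw [ih (gs ++ [cur ++ ["<eoc>"]]) [], ih [cur ++ ["<eoc>"]] []]
      simp
    · simp only [if_neg h]
      exact ih gs (cur ++ [t])

-- main invariant: A's interleaved fold = grouping fold, filtered and counted afterwards
theorem stepA_eq_pipeline (mx mn : Int) (ts : List String)
    (seqs : List (List String)) (lex : PySem.Dict String Int) (c : List String) :
    ts.foldl (pvStepA mx mn) (seqs, lex, c) =
      (seqs ++ ((ts.foldl pvGroupStep ([], c)).1.filter (pvP mx mn)),
       pvCounterUpdate lex ((ts.foldl pvGroupStep ([], c)).1.filter (pvP mx mn)).flatten,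
       (ts.foldl pvGroupStep ([], c)).2) := by
  induction ts generalizing seqs lex c with
  | nil => simp [pvCounterUpdate]
  | cons t ts ih =>
    simp only [List.foldl_cons, pvStepA, pvGroupStep]
    by_cases h : t = "<eoc>"
    · subst h
      simp only [reduceIte, List.nil_append]
      rw [groupStep_acc ts [c ++ ["<eoc>"]] []]
      by_cases hp : pvP mx mn (c ++ ["<eoc>"]) = true
      · have hcond : (c ++ ["<eoc>"]) ≠ [] ∧ ((c ++ ["<eoc>"]).length : Int) ≤ mx ∧ ((c ++ ["<eoc>"]).length : Int) ≥ mn := by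
          simp [pvP] at hp ⊢
          omega
        rw [if_pos hcond, ih]
        simp [hp, pvCounterUpdate, List.foldl_append]
      · have hcond : ¬((c ++ ["<eoc>"]) ≠ [] ∧ ((c ++ ["<eoc>"]).length : Int) ≤ mx ∧ ((c ++ ["<eoc>"]).length : Int) ≥ mn) := by
          simp [pvP] at hp ⊢
          omega
        rw [if_neg hcond, ih]
        simp [hp]
    · simp only [if_neg h]
      exact ih seqs lex (c ++ [t])

-- nested per-thread folds = one fold over the flattened stream
theorem foldl_threads_flatten (threads : List (List String)) (f : (List (List String) × PySem.Dict String Int × List String) → String → (List (List String) × PySem.Dict String Int × List String)) (init : List (List String) × PySem.Dict String Int × List String) :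
    threads.foldl (fun st thread => thread.foldl f st) init = threads.flatten.foldl f init := by
  induction threads generalizing init with
  | nil => rfl
  | cons t ts ih => simp [List.foldl_append, ih]

-- B's concatenation loop builds the flattened stream
theorem foldl_append_flatten (threads : List (List String)) (acc : List String) :
    threads.foldl (fun s thread => s ++ thread) acc = acc ++ threads.flatten := by
  induction threads generalizing acc with
  | nil => simp
  | cons t ts ih => simp [ih]

-- an '<eoc>'-free prefix only extends the current group
theorem groupStep_no_eoc (pre : List String) (h : "<eoc>" ∉ pre)
    (gs : List (List String)) (c : List String) :
    pre.foldl pvGroupStep (gs, c) = (gs, c ++ pre) := by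
  induction pre generalizing c with
  | nil => simp
  | cons t ts ih =>
    simp only [List.mem_cons, not_or] at h
    simp only [List.foldl_cons, pvGroupStep, if_neg (Ne.symm h.1)]
    rw [ih h.2]
    simp

-- filtered groups of the fold = B's index-and-slice recursion
theorem filter_groups_eq_sliceSeqs (mx mn : Int) (s : List String) :
    ((s.foldl pvGroupStep ([], [])).1.filter (pvP mx mn)) = pvSliceSeqs s mx mn := by
  induction hn : s.length using Nat.strong_induction_on generalizing s with
  | _ n ih =>
  rw [pvSliceSeqs]
  split
  next h =>
    have hmem : "<eoc>" ∉ s := (PySem.List.index?_eq_none_iff s "<eoc>").mp h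
    rw [groupStep_no_eoc s hmem]
    simp
  next i h =>
    obtain ⟨pre, suf, hs, hlen, hpre⟩ := (PySem.List.index?_eq_some_iff s "<eoc>" i).mp h
    have htake : s.take (i + 1) = pre ++ ["<eoc>"] := by
      subst hs; rw [← hlen]; simp [List.take_append]
    have hdrop : s.drop (i + 1) = suf := by
      subst hs; rw [← hlen]; simp [List.drop_append]
    have hfold : s.foldl pvGroupStep ([], []) =
        ((pre ++ ["<eoc>"]) :: (suf.foldl pvGroupStep ([], [])).1,
         (suf.foldl pvGroupStep ([], [])).2) := by
      subst hs
      rw [show pre ++ "<eoc>" :: suf = (pre ++ ["<eoc>"]) ++ suf by simp,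
          List.foldl_append, List.foldl_append, groupStep_no_eoc pre hpre]
      simp only [List.foldl_cons, List.foldl_nil, pvGroupStep, List.nil_append, reduceIte]
      rw [groupStep_acc suf [pre ++ ["<eoc>"]] []]
      simp
    have hrec := ih (suf.length) (by subst hs hn; simp; omega) suf rfl
    have hplen : ((pre ++ ["<eoc>"]).length : Int) = (i : Int) + 1 := by
      simp [hlen]
    rw [hfold, hdrop]
    by_cases hc : mn ≤ (i : Int) + 1 ∧ (i : Int) + 1 ≤ mx
    · rw [if_pos hc]
      have hp : pvP mx mn (pre ++ ["<eoc>"]) = true := by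
        simp only [pvP, decide_eq_true_eq, hplen]
        omega
      simp only [List.filter_cons, hp, htake]
      rw [hrec]
      simp
    · rw [if_neg hc]
      have hp : pvP mx mn (pre ++ ["<eoc>"]) = false := by
        simp only [pvP, decide_eq_false_iff_not, hplen]
        omega
      simp only [List.filter_cons, hp]
      rw [hrec]
      simp

-- ===== VERDICT (by name: the statement is the Claim_ definition above) =====
theorem split_to_comment_sequences_spec : Claim_equal_split_to_comment_sequences := by
  intro threads mx mn _
  show _ = _
  unfold split_to_comment_sequences split_to_comment_sequences_alt
  rw [foldl_threads_flatten, stepA_eq_pipeline, foldl_append_flatten]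
  simp only [List.nil_append]
  rw [filter_groups_eq_sliceSeqs]
  rfl
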